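-- pv_equiv track=rewrite | github.com/Zzpecter/Codewars | BattleshipFieldValidator.py | check_nemo
-- ===== SOURCE A (Python) =====
-- def check_nemo(nemo):
--     for diagonal in nemo:
--         is_one = False
--         for number in diagonal:
--             if number == 1 and not is_one:
--                 is_one = True
--             elif number == 1 and is_one:
--                 return False
--             else:
--                 is_one = False
--     return True
-- ===== SOURCE B (Python) =====
-- def check_nemo(nemo):
--     return all(not (a == 1 and b == 1)
--                for row in nemo
--                for a, b in zip(row, row[1:]))
-- ===== Notes on version B (the rewrite author's own statement) =====
-- stated objective: simpler
-- what changed: Replaces A's stateful previous-was-one flag with a stateless check over adjacent pairs (zip of each row with its tail) inside a single all(...) expression.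
import Mathlib
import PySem

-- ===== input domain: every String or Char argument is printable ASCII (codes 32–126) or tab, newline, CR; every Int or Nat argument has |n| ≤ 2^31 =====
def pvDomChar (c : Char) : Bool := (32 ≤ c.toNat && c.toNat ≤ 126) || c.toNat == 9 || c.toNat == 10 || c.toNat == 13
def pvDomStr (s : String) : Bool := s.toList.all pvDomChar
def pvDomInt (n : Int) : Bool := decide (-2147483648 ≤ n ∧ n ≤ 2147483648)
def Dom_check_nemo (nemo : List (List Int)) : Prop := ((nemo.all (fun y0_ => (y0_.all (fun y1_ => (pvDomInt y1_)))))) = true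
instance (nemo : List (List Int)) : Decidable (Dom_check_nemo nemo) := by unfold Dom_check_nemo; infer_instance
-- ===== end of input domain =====

-- B replaces A's previous-was-one flag with a stateless adjacent-pair check (objective: simpler).

-- ===== PORT A =====
-- inner loop of A: `is_one` flag carried through the row; returns false on a second consecutive 1
def pvRowA (flag : Bool) : List Int → Bool
  | [] => true
  | n :: rest =>
    if n == 1 && !flag then pvRowA true rest
    else if n == 1 && flag then false
    else pvRowA false rest

def check_nemo (nemo : List (List Int)) : Bool :=
  nemo.all (fun diagonal => pvRowA false diagonal)

-- ===== PORT B =====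
-- `zip(row, row[1:])`: row[1:] is List.drop 1 (exact for the nonnegative slice start)
def check_nemo_alt (nemo : List (List Int)) : Bool :=
  nemo.all (fun row =>
    (row.zip (row.drop 1)).all (fun p => !(p.1 == 1 && p.2 == 1)))

-- ===== PRECONDITION & SPEC =====
def Spec_check_nemo (nemo : List (List Int)) (out : Bool) : Prop := out = check_nemo_alt nemo
instance (nemo : List (List Int)) (out : Bool) : Decidable (Spec_check_nemo nemo out) := by unfold Spec_check_nemo; infer_instance

-- ===== CLAIM (what is proved, stated in full; the proofs are below) =====
def Claim_equal_check_nemo : Prop := ∀ (nemo : List (List Int)), Dom_check_nemo nemo → Spec_check_nemo nemo (check_nemo nemo)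

-- ===== LEMMAS AND PROOFS =====

-- key invariant: the flag-carrying scan equals the pair check together with a head check against the flag
theorem pvRowA_eq (row : List Int) : ∀ flag : Bool,
    pvRowA flag row =
      (((row.zip (row.drop 1)).all (fun p => !(p.1 == 1 && p.2 == 1))) &&
        !(flag && row.headD 0 == 1)) := by
  induction row with
  | nil => intro flag; simp [pvRowA]
  | cons n rest ih =>
    intro flag
    cases rest with
    | nil =>
      by_cases h : n = 1 <;> cases flag <;> simp [pvRowA, h]
    | cons m rest' =>
      have hA : ∀ fl : Bool, pvRowA fl (n :: m :: rest') =
          if n = 1 then (if fl then false else pvRowA true (m :: rest'))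
          else pvRowA false (m :: rest') := by
        intro fl; by_cases h : n = 1 <;> cases fl <;> simp [pvRowA, h]
      rw [hA, ih true, ih false]
      by_cases h : n = 1 <;> by_cases hm : m = 1 <;> cases flag <;>
        (first
          | (simp [h, hm, Bool.and_comm, Bool.and_left_comm]; done)
          | (have h1 : (n == 1) = false := by simp [h]
             have h2 : (m == 1) = false := by simp [hm]
             simp [h1, h2, h, hm, Bool.and_comm, Bool.and_left_comm]))

-- ===== VERDICT (by name: the statement is the Claim_ definition above) =====
theorem check_nemo_spec : Claim_equal_check_nemo := by
  intro nemo _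
  unfold Spec_check_nemo check_nemo check_nemo_alt
  simp [pvRowA_eq]
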